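-- pv_equiv track=rewrite | github.com/saekumar/C-Java | Tutorial1/Tutorial1/BFS/JumpingNmbr.py | JumpingNmbr
-- ===== SOURCE A (Python) =====
-- def JumpingNmbr(n):
--     if n<=10:
--         return True
--     digits = [int(digit) for digit in str(n)]
--     for i in range(len(digits)-1):
--         if(abs(digits[i]-digits[i+1])!=1):
--             return False
--     return True
-- ===== SOURCE B (Python) =====
-- def JumpingNmbr(n):
--     if n <= 10:
--         return True
--     prev = n % 10
--     n //= 10
--     while n > 0:
--         cur = n % 10
--         if abs(cur - prev) != 1:
--             return False
--         prev = cur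
--         n //= 10
--     return True
-- ===== Notes on version B (the rewrite author's own statement) =====
-- stated objective: alternative
-- what changed: Extracts digits arithmetically right-to-left with %10 and //10 keeping only a running previous digit, instead of building an indexed digit list from str(n) and scanning it with range indices.
import Mathlib
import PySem

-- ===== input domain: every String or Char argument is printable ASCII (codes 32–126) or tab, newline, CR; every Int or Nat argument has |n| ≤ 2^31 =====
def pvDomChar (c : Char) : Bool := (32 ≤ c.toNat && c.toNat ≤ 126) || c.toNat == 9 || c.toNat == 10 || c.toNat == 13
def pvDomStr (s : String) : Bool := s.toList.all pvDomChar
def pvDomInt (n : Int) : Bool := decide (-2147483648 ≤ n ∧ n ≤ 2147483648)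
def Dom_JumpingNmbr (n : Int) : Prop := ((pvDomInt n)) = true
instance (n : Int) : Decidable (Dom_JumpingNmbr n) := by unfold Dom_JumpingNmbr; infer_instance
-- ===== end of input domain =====

-- B replaces A's str(n)-built indexed digit list with arithmetic digit extraction
-- (%10, //10) keeping only a running previous digit; same results, no list or string.

-- ===== PORT A =====
-- 'for i in range(len(digits)-1): if abs(digits[i]-digits[i+1])!=1: return False' with early return
def pvALoop (digits : List Int) : List Int → Bool
  | [] => true
  | i :: rest =>
      if (PySem.List.pyGetD digits i 0 - PySem.List.pyGetD digits (i + 1) 0).natAbs ≠ 1 then false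
      else pvALoop digits rest

def JumpingNmbr (n : Int) : Bool :=
  if n ≤ 10 then true
  else
    -- digits = [int(digit) for digit in str(n)]; int(c) for a decimal digit char c is
    -- its code minus 48 — exact here, since str(n) for n > 10 consists of digits only
    let digits : List Int := (PySem.Int.toStr n).toList.map (fun c => (c.toNat : Int) - 48)
    pvALoop digits (PySem.List.pyRange 0 (PySem.List.len digits - 1) 1)

-- ===== PORT B =====
-- 'while n > 0: cur = n % 10; if abs(cur-prev) != 1: return False; prev = cur; n //= 10'
def pvBLoop (prev : Int) (n : Int) : Bool :=
  if h : 0 < n then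
    let cur := PySem.Int.mod n 10
    if (cur - prev).natAbs ≠ 1 then false
    else pvBLoop cur (PySem.Int.floordiv n 10)
  else true
termination_by n.toNat
decreasing_by
  have hn : n = ((n.toNat : Nat) : Int) := by omega
  have hfd : PySem.Int.floordiv n 10 = ((n.toNat / 10 : Nat) : Int) := by
    rw [hn]; exact_mod_cast PySem.Int.floordiv_natCast n.toNat 10
  rw [hfd]
  have := Nat.div_lt_self (by omega : 0 < n.toNat) (by omega : 1 < 10)
  omega

def JumpingNmbr_alt (n : Int) : Bool :=
  if n ≤ 10 then true
  else pvBLoop (PySem.Int.mod n 10) (PySem.Int.floordiv n 10)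

-- ===== PRECONDITION & SPEC =====
def Spec_JumpingNmbr (n : Int) (out : Bool) : Prop := out = JumpingNmbr_alt n
instance (n : Int) (out : Bool) : Decidable (Spec_JumpingNmbr n out) := by unfold Spec_JumpingNmbr; infer_instance

-- ===== CLAIM (what is proved, stated in full; the proofs are below) =====
def Claim_equal_JumpingNmbr : Prop := ∀ (n : Int), Dom_JumpingNmbr n → Spec_JumpingNmbr n (JumpingNmbr n)

-- ===== LEMMAS AND PROOFS =====

-- the common reference: a structural scan of adjacent digit pairs
def pvScan : List Int → Bool
  | a :: b :: t => if (a - b).natAbs ≠ 1 then false else pvScan (b :: t)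
  | _ => true

-- `Nat.toDigits` facts (accumulator form, fuel irrelevance, peel the last digit)
lemma toDigitsCore_acc (f : Nat) : ∀ (n : Nat) (ds : List Char),
    Nat.toDigitsCore 10 f n ds = Nat.toDigitsCore 10 f n [] ++ ds := by
  induction f with
  | zero => intro n ds; simp [Nat.toDigitsCore]
  | succ f ih =>
      intro n ds
      simp only [Nat.toDigitsCore]
      by_cases h : n / 10 = 0
      · simp [h]
      · simp only [h, if_false]
        rw [ih (n / 10) (Nat.digitChar (n % 10) :: ds), ih (n / 10) [Nat.digitChar (n % 10)]]
        simp

lemma toDigitsCore_fuel : ∀ (f f' n : Nat), n < f → n < f' →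
    Nat.toDigitsCore 10 f n [] = Nat.toDigitsCore 10 f' n [] := by
  intro f
  induction f with
  | zero => intro f' n h; omega
  | succ f ih =>
      intro f' n h h'
      cases f' with
      | zero => omega
      | succ f' =>
          simp only [Nat.toDigitsCore]
          by_cases h0 : n / 10 = 0
          · simp [h0]
          · simp only [h0, if_false]
            rw [toDigitsCore_acc, toDigitsCore_acc f']
            have hlt : n / 10 < f := by
              have := Nat.div_lt_self (by omega : 0 < n) (by omega : 1 < 10)
              omega
            have hlt' : n / 10 < f' := by
              have := Nat.div_lt_self (by omega : 0 < n) (by omega : 1 < 10)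
              omega
            rw [ih f' (n / 10) hlt hlt']

lemma toDigits_step (n : Nat) (h : 10 ≤ n) :
    Nat.toDigits 10 n = Nat.toDigits 10 (n / 10) ++ [Nat.digitChar (n % 10)] := by
  unfold Nat.toDigits
  conv_lhs => simp only [Nat.toDigitsCore]
  have h0 : n / 10 ≠ 0 := by
    have := Nat.div_le_div_right (c := 10) h
    simp at this; omega
  simp only [h0, if_false]
  rw [toDigitsCore_acc]
  congr 1
  exact toDigitsCore_fuel n (n / 10 + 1) (n / 10)
    (Nat.div_lt_self (by omega) (by omega)) (by omega)

lemma toDigits_small (n : Nat) (h : n < 10) : Nat.toDigits 10 n = [Nat.digitChar n] := by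
  unfold Nat.toDigits
  simp only [Nat.toDigitsCore]
  have h0 : n / 10 = 0 := Nat.div_eq_of_lt h
  simp [h0, Nat.mod_eq_of_lt h]

lemma digitChar_toNat (d : Nat) (h : d < 10) : (Nat.digitChar d).toNat = 48 + d := by
  interval_cases d <;> decide

-- the Int digit list A builds, as a function of the Nat value
def pvDig (n : Nat) : List Int := (Nat.toDigits 10 n).map (fun c => (c.toNat : Int) - 48)

lemma pvDig_step (n : Nat) (h : 10 ≤ n) :
    pvDig n = pvDig (n / 10) ++ [((n % 10 : Nat) : Int)] := by
  unfold pvDig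
  rw [toDigits_step n h]
  simp [digitChar_toNat (n % 10) (Nat.mod_lt n (by omega))]

lemma pvDig_small (n : Nat) (h : n < 10) : pvDig n = [(n : Int)] := by
  unfold pvDig
  rw [toDigits_small n h]
  simp [digitChar_toNat n h]

-- scan over a list with the last element peeled off
lemma pvScan_append_pair (a b : Int) : ∀ (xs : List Int),
    pvScan (xs ++ [a, b]) = (pvScan (xs ++ [a]) && !decide ((a - b).natAbs ≠ 1)) := by
  intro xs
  induction xs with
  | nil => simp only [List.nil_append, pvScan]; by_cases h : (a - b).natAbs ≠ 1 <;> simp [h]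
  | cons x t ih =>
      cases t with
      | nil =>
          simp only [List.cons_append, List.nil_append, pvScan]
          by_cases h1 : (x - a).natAbs ≠ 1 <;> by_cases h2 : (a - b).natAbs ≠ 1 <;>
            simp [pvScan, h1, h2]
      | cons y t' =>
          simp only [List.cons_append, pvScan] at *
          by_cases h1 : (x - y).natAbs ≠ 1 <;> simp [h1, ih]

-- A's indexed loop is the structural scan
lemma pvALoop_eq_scan (xs : List Int) : ∀ (j : Nat),
    pvALoop xs (PySem.List.pyRange j (xs.length - 1) 1) = pvScan (xs.drop j) := by
  intro j
  by_cases hj : (j : Int) < (xs.length : Int) - 1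
  · -- inductive region: j < len - 1
    have hlen : j + 1 < xs.length := by omega
    rw [PySem.List.pyRange_one_cons hj]
    have h1 : ((j : Int) + 1) = (((j + 1 : Nat)) : Int) := by push_cast; ring
    simp only [pvALoop]
    rw [h1]
    rw [PySem.List.pyGetD_natCast, PySem.List.pyGetD_natCast]
    have hd : xs.drop j = xs[j] :: xs[j + 1] :: xs.drop (j + 2) := by
      rw [List.drop_eq_getElem_cons (by omega), List.drop_eq_getElem_cons hlen]
    have hgd1 : xs.getD j 0 = xs[j] := List.getD_eq_getElem xs 0 (by omega)
    have hgd2 : xs.getD (j + 1) 0 = xs[j + 1] := List.getD_eq_getElem xs 0 hlen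
    rw [hgd1, hgd2, hd]
    simp only [pvScan]
    by_cases hne : (xs[j] - xs[j + 1]).natAbs ≠ 1
    · simp [hne]
    · simp only [hne, if_false, if_neg hne]
      have := pvALoop_eq_scan xs (j + 1)
      rw [this]
      rw [List.drop_eq_getElem_cons hlen]
  · -- range empty, dropped list has ≤ 1 element
    rw [PySem.List.pyRange_one_eq_nil (by omega)]
    have : xs.length ≤ j + 1 := by omega
    simp only [pvALoop]
    match hx : xs.drop j with
    | [] => simp [pvScan]
    | [a] => simp [pvScan]
    | a :: b :: t =>
        have := List.length_drop (l := xs) (i := j)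
        rw [hx] at this
        simp at this
        omega
termination_by j => xs.length - j

-- B's while loop scans pvDig m with prev appended
lemma pvBLoop_eq_scan : ∀ (m : Nat), 0 < m → ∀ (prev : Int),
    pvBLoop prev (m : Int) = pvScan (pvDig m ++ [prev]) := by
  intro m
  induction m using Nat.strong_induction_on with
  | _ m ih =>
      intro hm prev
      rw [pvBLoop]
      have hpos : (0 : Int) < (m : Int) := by exact_mod_cast hm
      rw [dif_pos hpos]
      have hmod : PySem.Int.mod (m : Int) 10 = ((m % 10 : Nat) : Int) := by
        exact_mod_cast PySem.Int.mod_natCast m 10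
      have hdiv : PySem.Int.floordiv (m : Int) 10 = ((m / 10 : Nat) : Int) := by
        exact_mod_cast PySem.Int.floordiv_natCast m 10
      rw [hmod, hdiv]
      show (if (((m % 10 : Nat) : Int) - prev).natAbs ≠ 1 then false
              else pvBLoop ((m % 10 : Nat) : Int) ((m / 10 : Nat) : Int)) =
            pvScan (pvDig m ++ [prev])
      by_cases hsmall : m < 10
      · -- m is the last digit: the recursive call sees m / 10 = 0 and stops
        have h10 : m / 10 = 0 := Nat.div_eq_of_lt hsmall
        have hm10 : m % 10 = m := Nat.mod_eq_of_lt hsmall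
        rw [pvDig_small m hsmall, h10, hm10]
        by_cases hne : ((m : Int) - prev).natAbs ≠ 1
        · simp [pvScan, hne]
        · rw [if_neg hne, pvBLoop]
          simp [pvScan, hne]
      · -- peel the last digit of pvDig m
        rw [pvDig_step m (by omega), List.append_assoc, List.singleton_append]
        rw [pvScan_append_pair ((m % 10 : Nat) : Int) prev (pvDig (m / 10))]
        by_cases hne : (((m % 10 : Nat) : Int) - prev).natAbs ≠ 1
        · rw [if_pos hne, decide_eq_true hne, Bool.not_true, Bool.and_false]
        · rw [if_neg hne]
          have hrec := ih (m / 10) (Nat.div_lt_self (by omega) (by omega))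
            (by omega) ((m % 10 : Nat) : Int)
          rw [hrec, decide_eq_false hne, Bool.not_false, Bool.and_true]

-- A on n > 10 computes pvScan of the digit list of n.toNat
lemma JumpingNmbr_eq_scan (n : Int) (h : ¬ n ≤ 10) :
    JumpingNmbr n = pvScan (pvDig n.toNat) := by
  unfold JumpingNmbr
  rw [if_neg h]
  have hpos : ¬ n < 0 := by omega
  have hchars : (PySem.Int.toStr n).toList = Nat.toDigits 10 n.toNat := by
    rw [PySem.Int.toList_toStr]
    unfold PySem.Int.toChars
    rw [if_neg hpos]
  simp only [hchars]
  have hmap : (Nat.toDigits 10 n.toNat).map (fun c => (c.toNat : Int) - 48) = pvDig n.toNat := rfl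
  rw [hmap]
  rw [PySem.List.len_eq]
  have := pvALoop_eq_scan (pvDig n.toNat) 0
  simpa using this

-- ===== VERDICT (by name: the statement is the Claim_ definition above) =====
theorem JumpingNmbr_spec : Claim_equal_JumpingNmbr := by
  intro n _
  unfold Spec_JumpingNmbr
  by_cases h : n ≤ 10
  · unfold JumpingNmbr JumpingNmbr_alt
    rw [if_pos h, if_pos h]
  · rw [JumpingNmbr_eq_scan n h]
    unfold JumpingNmbr_alt
    rw [if_neg h]
    have hmod : PySem.Int.mod n 10 = ((n.toNat % 10 : Nat) : Int) := by
      have : n = ((n.toNat : Nat) : Int) := by omega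
      rw [this]
      exact_mod_cast PySem.Int.mod_natCast n.toNat 10
    have hdiv : PySem.Int.floordiv n 10 = ((n.toNat / 10 : Nat) : Int) := by
      have : n = ((n.toNat : Nat) : Int) := by omega
      rw [this]
      exact_mod_cast PySem.Int.floordiv_natCast n.toNat 10
    rw [hmod, hdiv]
    have hdivpos : 0 < n.toNat / 10 := by
      have h11 : 11 ≤ n.toNat := by omega
      omega
    rw [pvBLoop_eq_scan (n.toNat / 10) hdivpos]
    rw [pvDig_step n.toNat (by omega)]
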